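-- pv_equiv track=rewrite | github.com/Hikaru67/news-trading | services/fed-calendar-client/main.py | determine_event_direction
-- ===== SOURCE A (Python) =====
-- def determine_event_direction(event_type: str, details: str) -> str:
--     """Determine market direction based on event type and details"""
--     details_lower = details.lower()
--
--     if event_type == 'FED_MEETING':
--         # Analyze meeting details for rate decision hints
--         if any(word in details_lower for word in ['hawkish', 'rate hike', 'tightening', 'inflation concern']):
--             return 'BEAR'
--         elif any(word in details_lower for word in ['dovish', 'rate cut', 'easing', 'growth concern']):
--             return 'BULL'
--         else:
--             return 'NEUTRAL'
--
--     elif event_type == 'FED_SPEECH':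
--         # Analyze speech content for sentiment
--         if any(word in details_lower for word in ['hawkish', 'inflation', 'tightening']):
--             return 'BEAR'
--         elif any(word in details_lower for word in ['dovish', 'growth', 'easing']):
--             return 'BULL'
--         else:
--             return 'NEUTRAL'
--
--     elif event_type == 'ECONOMIC_DATA':
--         # Economic data is usually neutral
--         return 'NEUTRAL'
--
--     elif event_type == 'REGULATORY_ANNOUNCEMENT':
--         # Regulatory news is usually bearish
--         return 'BEAR'
--
--     return 'NEUTRAL'
-- ===== SOURCE B (Python) =====
-- # Flat rule base: (event_type, keyword, direction) triples, scanned exhaustively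
-- # (no per-event branches, no first-match short-circuit).
-- KEYWORD_TRIPLES = [
--     ('FED_MEETING', 'hawkish', 'BEAR'),
--     ('FED_MEETING', 'rate hike', 'BEAR'),
--     ('FED_MEETING', 'tightening', 'BEAR'),
--     ('FED_MEETING', 'inflation concern', 'BEAR'),
--     ('FED_MEETING', 'dovish', 'BULL'),
--     ('FED_MEETING', 'rate cut', 'BULL'),
--     ('FED_MEETING', 'easing', 'BULL'),
--     ('FED_MEETING', 'growth concern', 'BULL'),
--     ('FED_SPEECH', 'hawkish', 'BEAR'),
--     ('FED_SPEECH', 'inflation', 'BEAR'),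
--     ('FED_SPEECH', 'tightening', 'BEAR'),
--     ('FED_SPEECH', 'dovish', 'BULL'),
--     ('FED_SPEECH', 'growth', 'BULL'),
--     ('FED_SPEECH', 'easing', 'BULL'),
-- ]
--
-- # Keyword-free default per event type; anything unlisted is NEUTRAL.
-- DEFAULTS = {'REGULATORY_ANNOUNCEMENT': 'BEAR'}
--
--
-- def determine_event_direction(event_type: str, details: str) -> str:
--     """Determine market direction: collect ALL directions whose keywords hit,
--     then pick by the fixed priority BEAR > BULL, falling back to the default."""
--     details_lower = details.lower()
--     hits = {d for (et, kw, d) in KEYWORD_TRIPLES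
--             if et == event_type and kw in details_lower}
--     for direction in ('BEAR', 'BULL'):
--         if direction in hits:
--             return direction
--     return DEFAULTS.get(event_type, 'NEUTRAL')
-- ===== Notes on version B (the rewrite author's own statement) =====
-- stated objective: alternative
-- what changed: Replaced the per-event-type branch cascade with an exhaustive scan of a flat (event_type, keyword, direction) triple base that collects the SET of all matched directions, followed by a separate priority pass (BEAR > BULL) and a defaults dict for keyword-free event types.
import Mathlib
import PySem

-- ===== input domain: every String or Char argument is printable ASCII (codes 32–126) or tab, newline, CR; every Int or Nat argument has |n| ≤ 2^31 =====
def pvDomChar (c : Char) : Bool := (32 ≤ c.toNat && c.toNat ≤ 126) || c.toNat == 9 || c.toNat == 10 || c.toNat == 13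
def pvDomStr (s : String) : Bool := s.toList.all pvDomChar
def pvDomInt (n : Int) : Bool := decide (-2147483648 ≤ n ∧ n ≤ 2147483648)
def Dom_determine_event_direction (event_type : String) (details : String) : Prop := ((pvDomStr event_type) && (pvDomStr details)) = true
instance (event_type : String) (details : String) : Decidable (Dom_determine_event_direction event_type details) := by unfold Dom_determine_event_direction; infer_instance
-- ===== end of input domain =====

-- B changes the structure: a flat triple base scanned exhaustively into a set of matched
-- directions, then a priority pass; same values as A's branch cascade (objective: alternative).

-- ===== PORT A =====
-- literal transliteration of A's if/elif cascade; 'w in details_lower' = PySem.Str.isIn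
def determine_event_direction (event_type : String) (details : String) : String :=
  let details_lower := PySem.Str.lower details
  if event_type == "FED_MEETING" then
    if (["hawkish", "rate hike", "tightening", "inflation concern"].any
        (fun word => PySem.Str.isIn word details_lower)) then "BEAR"
    else if (["dovish", "rate cut", "easing", "growth concern"].any
        (fun word => PySem.Str.isIn word details_lower)) then "BULL"
    else "NEUTRAL"
  else if event_type == "FED_SPEECH" then
    if (["hawkish", "inflation", "tightening"].any
        (fun word => PySem.Str.isIn word details_lower)) then "BEAR"
    else if (["dovish", "growth", "easing"].any
        (fun word => PySem.Str.isIn word details_lower)) then "BULL"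
    else "NEUTRAL"
  else if event_type == "ECONOMIC_DATA" then "NEUTRAL"
  else if event_type == "REGULATORY_ANNOUNCEMENT" then "BEAR"
  else "NEUTRAL"

-- ===== PORT B =====
-- Source B's module-level flat rule base KEYWORD_TRIPLES
def pvTriples : List (String × String × String) :=
  [ ("FED_MEETING", "hawkish", "BEAR"),
    ("FED_MEETING", "rate hike", "BEAR"),
    ("FED_MEETING", "tightening", "BEAR"),
    ("FED_MEETING", "inflation concern", "BEAR"),
    ("FED_MEETING", "dovish", "BULL"),
    ("FED_MEETING", "rate cut", "BULL"),
    ("FED_MEETING", "easing", "BULL"),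
    ("FED_MEETING", "growth concern", "BULL"),
    ("FED_SPEECH", "hawkish", "BEAR"),
    ("FED_SPEECH", "inflation", "BEAR"),
    ("FED_SPEECH", "tightening", "BEAR"),
    ("FED_SPEECH", "dovish", "BULL"),
    ("FED_SPEECH", "growth", "BULL"),
    ("FED_SPEECH", "easing", "BULL") ]

-- Source B's DEFAULTS dict
def pvDefaults : PySem.Dict String String :=
  PySem.Dict.ofList [("REGULATORY_ANNOUNCEMENT", "BEAR")]

-- the 'for direction in ('BEAR','BULL')' priority loop of Source B
def pvPick (prio : List String) (hits : PySem.Set String) : Option String :=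
  match prio with
  | [] => none
  | d :: rest => if PySem.Set.contains hits d then some d else pvPick rest hits

def determine_event_direction_alt (event_type : String) (details : String) : String :=
  let details_lower := PySem.Str.lower details
  -- set comprehension over the flat triple base
  let hits : PySem.Set String :=
    PySem.Set.ofList
      ((pvTriples.filter
          (fun t => t.1 == event_type && PySem.Str.isIn t.2.1 details_lower)).map
        (fun t => t.2.2))
  match pvPick ["BEAR", "BULL"] hits with
  | some d => d
  | none => pvDefaults.getD event_type "NEUTRAL"

-- ===== PRECONDITION & SPEC =====
def Spec_determine_event_direction (event_type : String) (details : String) (out : String) : Prop := out = determine_event_direction_alt event_type details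
instance (event_type : String) (details : String) (out : String) : Decidable (Spec_determine_event_direction event_type details out) := by unfold Spec_determine_event_direction; infer_instance

-- ===== CLAIM (what is proved, stated in full; the proofs are below) =====
def Claim_equal_determine_event_direction : Prop := ∀ (event_type : String) (details : String), Dom_determine_event_direction event_type details → Spec_determine_event_direction event_type details (determine_event_direction event_type details)

-- ===== LEMMAS AND PROOFS =====
-- membership in the set of projected matching triples = an 'any' over the triple base
theorem pv_contains_any (l : List (String × String × String))
    (p : String × String × String → Bool) (x : String) :
    PySem.Set.contains
        (PySem.Set.ofList ((l.filter p).map (fun t => t.2.2))) x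
      = l.any (fun t => p t && t.2.2 == x) := by
  rw [Bool.eq_iff_iff]
  simp only [PySem.Set.contains_iff, PySem.Set.mem_ofList, List.mem_map, List.mem_filter,
    List.any_eq_true, Bool.and_eq_true, beq_iff_eq]
  constructor
  · rintro ⟨t, ⟨ht, hp⟩, hx⟩; exact ⟨t, ht, ⟨hp, hx⟩⟩
  · rintro ⟨t, ht, hp, hx⟩; exact ⟨t, ⟨ht, hp⟩, hx⟩

-- the DEFAULTS lookup in closed form
theorem pv_getD_defaults (et : String) :
    pvDefaults.getD et "NEUTRAL"
      = if et = "REGULATORY_ANNOUNCEMENT" then "BEAR" else "NEUTRAL" := by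
  have h : pvDefaults = PySem.Dict.mk [("REGULATORY_ANNOUNCEMENT", "BEAR")] := by decide
  rw [h]
  simp only [PySem.Dict.getD, PySem.Dict.get?, List.find?]
  by_cases hh : et = "REGULATORY_ANNOUNCEMENT"
  · subst hh; simp
  · have hb : ("REGULATORY_ANNOUNCEMENT" == et) = false := by
      simp [beq_eq_false_iff_ne, Ne.symm hh]
    rw [hb]; simp [hh]

-- B's priority pass, rephrased as two 'any' scans of the triple base
theorem pv_alt_eq (event_type details : String) :
    determine_event_direction_alt event_type details
      = (if pvTriples.any (fun t =>
            (t.1 == event_type && PySem.Str.isIn t.2.1 (PySem.Str.lower details)) && t.2.2 == "BEAR")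
          then "BEAR"
          else if pvTriples.any (fun t =>
            (t.1 == event_type && PySem.Str.isIn t.2.1 (PySem.Str.lower details)) && t.2.2 == "BULL")
          then "BULL"
          else pvDefaults.getD event_type "NEUTRAL") := by
  simp only [determine_event_direction_alt, pvPick]
  rw [pv_contains_any, pv_contains_any]
  split_ifs <;> rfl

theorem pv_case_other (event_type details : String)
    (h1 : event_type ≠ "FED_MEETING") (h2 : event_type ≠ "FED_SPEECH") :
    determine_event_direction event_type details
      = determine_event_direction_alt event_type details := by
  rw [pv_alt_eq, pv_getD_defaults]
  unfold determine_event_direction pvTriples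
  simp [h1, h2, Ne.symm h1, Ne.symm h2]
  intro h3 h4
  rw [h3] at h4
  exact absurd h4 (by decide)

theorem pv_case_meeting (details : String) :
    determine_event_direction "FED_MEETING" details
      = determine_event_direction_alt "FED_MEETING" details := by
  rw [pv_alt_eq, pv_getD_defaults]
  unfold determine_event_direction pvTriples
  simp

theorem pv_case_speech (details : String) :
    determine_event_direction "FED_SPEECH" details
      = determine_event_direction_alt "FED_SPEECH" details := by
  rw [pv_alt_eq, pv_getD_defaults]
  unfold determine_event_direction pvTriples
  simp

-- ===== VERDICT (by name: the statement is the Claim_ definition above) =====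
theorem determine_event_direction_spec : Claim_equal_determine_event_direction := by
  intro event_type details _
  unfold Spec_determine_event_direction
  by_cases h1 : event_type = "FED_MEETING"
  · subst h1; exact pv_case_meeting details
  · by_cases h2 : event_type = "FED_SPEECH"
    · subst h2; exact pv_case_speech details
    · exact pv_case_other event_type details h1 h2
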